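-- pv_equiv track=rewrite | github.com/Mir-2002/exceptionals-v2 | server/controller/ProjectController.py | calculate_project_status
-- ===== SOURCE A (Python) =====
-- def calculate_project_status(files):
--     if not files:
--         return "empty"
--
--     # If files exist but have no functions/classes (non-Python or empty files)
--     if all(not f.get("functions") and not f.get("classes") for f in files):
--         return "empty"
--
--     # If all files with content have been fully processed
--     if all(
--         (f.get("functions") == f.get("processed_functions", [])) and
--         (f.get("classes") == f.get("processed_classes", []))
--         for f in files if f.get("functions") or f.get("classes")
--     ):
--         return "complete"
--
--     # Files exist with content but not fully processed
--     return "in_progress"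
-- ===== SOURCE B (Python) =====
-- def calculate_project_status(files):
--     # Each file is classified independently into a severity rank:
--     # 0 = no content, 1 = content fully processed, 2 = content pending.
--     # The project status is the maximum rank over all files (join in the
--     # 0 < 1 < 2 lattice), looked up in a status table.
--     def rank(f):
--         if not (f.get("functions") or f.get("classes")):
--             return 0
--         if (f.get("functions") == f.get("processed_functions", []) and
--                 f.get("classes") == f.get("processed_classes", [])):
--             return 1
--         return 2
--     return ("empty", "complete", "in_progress")[max(map(rank, files), default=0)]
-- ===== Notes on version B (the rewrite author's own statement) =====
-- stated objective: alternative
-- what changed: Replaced A's staged whole-list scans and early-return chain by a per-file severity classification (0=no content, 1=processed, 2=pending) combined with max as a lattice join, the result indexing a status table.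
import Mathlib
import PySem

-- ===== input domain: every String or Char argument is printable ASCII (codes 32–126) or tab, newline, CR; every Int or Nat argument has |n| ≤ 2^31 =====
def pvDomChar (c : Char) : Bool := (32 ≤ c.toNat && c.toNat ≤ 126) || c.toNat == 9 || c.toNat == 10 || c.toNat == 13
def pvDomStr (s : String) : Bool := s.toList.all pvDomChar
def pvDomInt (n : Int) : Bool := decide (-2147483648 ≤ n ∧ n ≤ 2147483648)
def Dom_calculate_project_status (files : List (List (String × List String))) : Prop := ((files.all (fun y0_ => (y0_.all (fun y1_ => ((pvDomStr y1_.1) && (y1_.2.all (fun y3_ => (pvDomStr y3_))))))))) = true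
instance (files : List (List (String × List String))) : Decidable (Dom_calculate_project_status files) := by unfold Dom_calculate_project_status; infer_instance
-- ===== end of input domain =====

-- B classifies each file into a severity rank (0 no content, 1 processed, 2 pending) and
-- combines the ranks with max as a lattice join, indexing a status table; same value as A
-- on every input (alternative decomposition, same cost).

-- shared dict helpers: f.get(k) and f.get(k, []) on an association list (first match)
def pvGet (f : List (String × List String)) (k : String) : Option (List String) :=
  (f.find? (fun p => p.1 == k)).map (·.2)

def pvGetD (f : List (String × List String)) (k : String) : List String :=
  (pvGet f k).getD []

-- Python truthiness of f.get(k): None and [] are falsy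
def pvTruthy (o : Option (List String)) : Bool :=
  match o with
  | none => false
  | some l => !l.isEmpty

-- ===== PORT A =====
def calculate_project_status (files : List (List (String × List String))) : String :=
  if files.isEmpty then "empty"
  else if files.all (fun f => !pvTruthy (pvGet f "functions") && !pvTruthy (pvGet f "classes")) then "empty"
  else if (files.filter (fun f => pvTruthy (pvGet f "functions") || pvTruthy (pvGet f "classes"))).all
      (fun f => (pvGet f "functions" == some (pvGetD f "processed_functions")) &&
                (pvGet f "classes" == some (pvGetD f "processed_classes"))) then "complete"
  else "in_progress"

-- ===== PORT B =====
-- per-file severity rank, the inner `rank` of Source B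
def pvRank (f : List (String × List String)) : Nat :=
  if !(pvTruthy (pvGet f "functions") || pvTruthy (pvGet f "classes")) then 0
  else if (pvGet f "functions" == some (pvGetD f "processed_functions")) &&
          (pvGet f "classes" == some (pvGetD f "processed_classes")) then 1
  else 2

def calculate_project_status_alt (files : List (List (String × List String))) : String :=
  -- max(map(rank, files), default=0) then tuple indexing (the index is always < 3,
  -- so the getD default is never used; it only makes the lookup total)
  (["empty", "complete", "in_progress"] : List String).getD
    ((files.map pvRank).foldl Nat.max 0) ""

-- ===== PRECONDITION & SPEC =====
def Spec_calculate_project_status (files : List (List (String × List String))) (out : String) : Prop := out = calculate_project_status_alt files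
instance (files : List (List (String × List String))) (out : String) : Decidable (Spec_calculate_project_status files out) := by unfold Spec_calculate_project_status; infer_instance

-- ===== CLAIM (what is proved, stated in full; the proofs are below) =====
def Claim_equal_calculate_project_status : Prop := ∀ (files : List (List (String × List String))), Dom_calculate_project_status files → Spec_calculate_project_status files (calculate_project_status files)

-- ===== LEMMAS AND PROOFS =====
def pvContent (f : List (String × List String)) : Bool :=
  pvTruthy (pvGet f "functions") || pvTruthy (pvGet f "classes")

def pvOK (f : List (String × List String)) : Bool :=
  (pvGet f "functions" == some (pvGetD f "processed_functions")) &&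
  (pvGet f "classes" == some (pvGetD f "processed_classes"))

theorem pvFoldl_max_acc (l : List Nat) (a : Nat) :
    l.foldl Nat.max a = Nat.max a (l.foldl Nat.max 0) := by
  induction l generalizing a with
  | nil => simp
  | cons x xs ih =>
    simp only [List.foldl_cons]
    rw [ih (Nat.max a x), ih (Nat.max 0 x)]
    simp [Nat.max_assoc]

-- characterisation of the fold of B in terms of the predicates of A's scans
theorem pvRank_eq (f : List (String × List String)) :
    pvRank f = if pvContent f then (if pvOK f then 1 else 2) else 0 := by
  simp only [pvRank, pvContent, pvOK]
  by_cases h1 : pvTruthy (pvGet f "functions") = true <;>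
    by_cases h2 : pvTruthy (pvGet f "classes") = true <;>
      simp [h1, h2]

theorem pvFilter_nil (rest : List (List (String × List String)))
    (h : rest.any pvContent = false) : rest.filter pvContent = [] := by
  simp only [List.any_eq_false] at h
  exact List.filter_eq_nil_iff.mpr (by intro x hx; simp [h x hx])

theorem pvMax_char (files : List (List (String × List String))) :
    (files.map pvRank).foldl Nat.max 0 =
      if files.any pvContent then
        (if (files.filter pvContent).all pvOK then 1 else 2)
      else 0 := by
  induction files with
  | nil => simp
  | cons f rest ih =>
    simp only [List.map_cons, List.foldl_cons, List.any_cons, List.filter_cons, pvRank_eq]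
    rw [pvFoldl_max_acc, ih]
    cases hc : pvContent f
    · cases hA : rest.any pvContent
      · simp
      · cases hB : (rest.filter pvContent).all pvOK <;> simp [hB]
    · cases hok : pvOK f
      · cases hA : rest.any pvContent <;>
          cases hB : (rest.filter pvContent).all pvOK <;>
            simp [hok, hB]
      · cases hA : rest.any pvContent
        · simp [hok, pvFilter_nil rest hA]
        · cases hB : (rest.filter pvContent).all pvOK <;>
            simp [hok, hB]

-- ===== VERDICT (by name: the statement is the Claim_ definition above) =====
theorem calculate_project_status_spec : Claim_equal_calculate_project_status := by
  intro files _
  unfold Spec_calculate_project_status calculate_project_status calculate_project_status_alt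
  rw [pvMax_char files]
  by_cases hany : files.any pvContent = true
  · have hne : files.isEmpty = false := by
      cases files with
      | nil => simp at hany
      | cons _ _ => rfl
    have hall : files.all (fun f => !pvTruthy (pvGet f "functions") && !pvTruthy (pvGet f "classes")) = false := by
      simp only [List.any_eq_true] at hany
      obtain ⟨f, hf, hcf⟩ := hany
      simp only [List.all_eq_false]
      refine ⟨f, hf, ?_⟩
      simp only [pvContent, Bool.or_eq_true] at hcf
      rcases hcf with h1 | h1 <;> simp [h1]
    rw [hne, hany, hall]
    simp only [if_true]
    by_cases hproc : (files.filter pvContent).all pvOK = true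
    · have : (files.filter (fun f => pvTruthy (pvGet f "functions") || pvTruthy (pvGet f "classes"))).all
          (fun f => (pvGet f "functions" == some (pvGetD f "processed_functions")) &&
                    (pvGet f "classes" == some (pvGetD f "processed_classes"))) = true := hproc
      rw [hproc, this]
      simp
    · have hpf := Bool.eq_false_iff.mpr hproc
      have : (files.filter (fun f => pvTruthy (pvGet f "functions") || pvTruthy (pvGet f "classes"))).all
          (fun f => (pvGet f "functions" == some (pvGetD f "processed_functions")) &&
                    (pvGet f "classes" == some (pvGetD f "processed_classes"))) = false := hpf
      rw [hpf, this]
      simp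
  · have hanyf := Bool.eq_false_iff.mpr hany
    by_cases hemp : files.isEmpty = true
    · rw [hemp]; simp [hanyf]
    · rw [Bool.eq_false_iff.mpr hemp]
      have hall : files.all (fun f => !pvTruthy (pvGet f "functions") && !pvTruthy (pvGet f "classes")) = true := by
        simp only [List.all_eq_true]
        intro f hf
        simp only [List.any_eq_false] at hanyf
        have hcf := hanyf f hf
        simp only [pvContent, Bool.or_eq_true, not_or, Bool.not_eq_true] at hcf
        simp [hcf.1, hcf.2]
      rw [hall]
      simp [hanyf]
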